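-- pv_equiv track=rewrite | github.com/waltaskew/Honors-Thesis | cooccurrence_similarity_working/get_cooccurrences.py | iter_unseparated_words
-- ===== SOURCE A (Python) =====
-- def iter_unseparated_words(text):
--     """Yields lists of words which are not separated by a stop word.
--     """
--     current_phrase = [text[0]]
--     prievious_word_pos = text[0][1]
--
--     for indexed_word in text[1:]:
--         word, word_pos = indexed_word
--         ## if the difference between the word_pos is greater
--         ## than 1, that means there was a stop word between
--         ## them which was removed in the index building stage
--         if word_pos - prievious_word_pos == 1:
--             current_phrase.append(indexed_word)
--         else:
--             yield current_phrase
--             current_phrase = [indexed_word]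
--         prievious_word_pos = word_pos
--     yield current_phrase
-- ===== SOURCE B (Python) =====
-- def iter_unseparated_words(text):
--     """Yields lists of words which are not separated by a stop word."""
--     while text:
--         head, rest = text[0], text[1:]
--         run, text = _take_run(head[1], rest)
--         yield [head] + run
--
--
-- def _take_run(prev, words):
--     """Split words into (run, rest): run is the maximal prefix whose
--     positions continue consecutively after prev."""
--     if words and words[0][1] - prev == 1:
--         run, rest = _take_run(words[0][1], words[1:])
--         return [words[0]] + run, rest
--     return [], words
-- ===== Notes on version B (the rewrite author's own statement) =====
-- stated objective: alternative
-- what changed: Replaced A's single pass with a mutable current-phrase accumulator and previous-position variable by a run-splitting decomposition: a helper peels off the maximal consecutive run at the head and the outer loop yields head+run and continues on the remainder.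
import Mathlib
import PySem

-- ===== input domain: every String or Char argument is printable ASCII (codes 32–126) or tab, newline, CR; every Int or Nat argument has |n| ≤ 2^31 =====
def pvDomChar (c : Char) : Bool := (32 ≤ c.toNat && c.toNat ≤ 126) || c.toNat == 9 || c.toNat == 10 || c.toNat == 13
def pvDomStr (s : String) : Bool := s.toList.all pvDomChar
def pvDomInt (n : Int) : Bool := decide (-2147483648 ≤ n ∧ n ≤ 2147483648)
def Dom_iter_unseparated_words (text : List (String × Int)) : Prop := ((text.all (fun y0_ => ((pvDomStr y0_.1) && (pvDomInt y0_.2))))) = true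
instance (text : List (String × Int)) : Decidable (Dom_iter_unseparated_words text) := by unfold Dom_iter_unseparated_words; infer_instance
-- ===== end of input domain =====

-- B replaces A's accumulator-per-element pass by a run-splitting decomposition (peel the maximal
-- consecutive run at the head, yield it, recurse on the remainder); alternative, same cost.


-- ===== PORT A =====
-- the for-loop over text[1:], state = (current_phrase, prievious_word_pos), yields collected in order
def iterUnsepLoopA : List (String × Int) → List (String × Int) → Int → List (List (String × Int))
  | [], current_phrase, _ => [current_phrase]
  | indexed_word :: rest, current_phrase, prev =>
      if indexed_word.2 - prev = 1 then
        iterUnsepLoopA rest (current_phrase ++ [indexed_word]) indexed_word.2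
      else
        current_phrase :: iterUnsepLoopA rest [indexed_word] indexed_word.2

def iter_unseparated_words (text : List (String × Int)) : List (List (String × Int)) :=
  match text with
  | [] => []   -- unreachable under Pre_: Python A raises IndexError on text[0]
  | t0 :: rest => iterUnsepLoopA rest [t0] t0.2

-- ===== PORT B =====
-- _take_run: maximal prefix of words continuing consecutively after prev, with the remainder
def takeRunB : Int → List (String × Int) → List (String × Int) × List (String × Int)
  | _, [] => ([], [])
  | prev, w :: ws =>
      if w.2 - prev = 1 then
        let (run, rest) := takeRunB w.2 ws
        (w :: run, rest)
      else
        ([], w :: ws)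

theorem takeRunB_snd_length (prev : Int) (ws : List (String × Int)) :
    (takeRunB prev ws).2.length ≤ ws.length := by
  induction ws generalizing prev with
  | nil => simp [takeRunB]
  | cons w ws ih =>
      simp only [takeRunB]
      split
      · exact le_trans (ih w.2) (Nat.le_succ _)
      · simp

def iter_unseparated_words_alt (text : List (String × Int)) : List (List (String × Int)) :=
  match text with
  | [] => []
  | head :: rest =>
      let p := takeRunB head.2 rest
      (head :: p.1) :: iter_unseparated_words_alt p.2
termination_by text.length
decreasing_by
  simpa using Nat.lt_succ_of_le (takeRunB_snd_length head.2 rest)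

-- ===== PRECONDITION & SPEC =====
-- Pre_ excludes only the empty list, on which Python A raises IndexError (text[0]); B yields nothing there.
def Pre_iter_unseparated_words (text : List (String × Int)) : Prop := text ≠ []
instance (text : List (String × Int)) : Decidable (Pre_iter_unseparated_words text) := by unfold Pre_iter_unseparated_words; infer_instance
def pvWitness_iter_unseparated_words : (List (String × Int)) := [("a", 1), ("b", 2), ("c", 5)]

def Spec_iter_unseparated_words (text : List (String × Int)) (out : List (List (String × Int))) : Prop := out = iter_unseparated_words_alt text
instance (text : List (String × Int)) (out : List (List (String × Int))) : Decidable (Spec_iter_unseparated_words text out) := by unfold Spec_iter_unseparated_words; infer_instance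

-- ===== CLAIM (what is proved, stated in full; the proofs are below) =====
def Claim_equal_iter_unseparated_words : Prop := ∀ (text : List (String × Int)), Dom_iter_unseparated_words text → Pre_iter_unseparated_words text → Spec_iter_unseparated_words text (iter_unseparated_words text)

-- ===== LEMMAS AND PROOFS =====

-- loop invariant: A's loop on rest, carrying the open phrase `cur` whose last position is `prev`,
-- produces the phrase closed by the head run followed by B's groups of the remainder.
theorem loopA_eq_runs (rest : List (String × Int)) (cur : List (String × Int)) (prev : Int) :
    iterUnsepLoopA rest cur prev =
      (cur ++ (takeRunB prev rest).1) :: iter_unseparated_words_alt (takeRunB prev rest).2 := by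
  induction rest generalizing cur prev with
  | nil => simp [iterUnsepLoopA, takeRunB, iter_unseparated_words_alt]
  | cons w ws ih =>
      by_cases h : w.2 - prev = 1
      · simp only [iterUnsepLoopA, takeRunB, if_pos h, ih (cur ++ [w]) w.2]
        simp
      · simp only [iterUnsepLoopA, takeRunB, if_neg h]
        rw [ih [w] w.2]
        simp [iter_unseparated_words_alt]

-- ===== VERDICT (by name: the statement is the Claim_ definition above) =====
theorem iter_unseparated_words_spec : Claim_equal_iter_unseparated_words := by
  intro text _ hpre
  unfold Spec_iter_unseparated_words
  match text with
  | [] => exact absurd rfl hpre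
  | t0 :: rest =>
      show iterUnsepLoopA rest [t0] t0.2 = _
      rw [loopA_eq_runs]
      simp [iter_unseparated_words_alt]
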